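-- pv_equiv track=rewrite | github.com/marmelab/quixo-python | src/game/moves.py | move_row
-- ===== SOURCE A (Python) =====
-- from copy import deepcopy
--
-- def move_row(board, row, y_start, y_end, value):
--     board_copy = deepcopy(board)
--
--     step = -1 if y_end > y_start else 1
--     index_start = y_start - 1 if y_end > y_start else y_start + 1
--     for y in range(y_end, index_start, step):
--         prev_val = board_copy[row][y]
--         board_copy[row][y] = value
--         value = prev_val
--
--     return board_copy
-- ===== SOURCE B (Python) =====
-- from copy import deepcopy
--
--
-- def move_row(board, row, y_start, y_end, value):
--     board_copy = deepcopy(board)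
--     shifted_row = board_copy[row]
--     shifted_row.pop(y_start)
--     shifted_row.insert(y_end, value)
--     return board_copy
-- ===== Notes on version B (the rewrite author's own statement) =====
-- stated objective: simpler
-- what changed: Replaces the direction-dependent carried-value swap loop (step/index_start case analysis plus an element-by-element value carry) by a single branchless pop of the element at y_start followed by an insert of value at y_end on the copied row.
-- outside the precondition, e.g. on move_row([[1, 2, 3]], 0, 0, -1, 9): A returns [[3, 2, 9]], B returns [[2, 9, 3]]
import Mathlib
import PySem

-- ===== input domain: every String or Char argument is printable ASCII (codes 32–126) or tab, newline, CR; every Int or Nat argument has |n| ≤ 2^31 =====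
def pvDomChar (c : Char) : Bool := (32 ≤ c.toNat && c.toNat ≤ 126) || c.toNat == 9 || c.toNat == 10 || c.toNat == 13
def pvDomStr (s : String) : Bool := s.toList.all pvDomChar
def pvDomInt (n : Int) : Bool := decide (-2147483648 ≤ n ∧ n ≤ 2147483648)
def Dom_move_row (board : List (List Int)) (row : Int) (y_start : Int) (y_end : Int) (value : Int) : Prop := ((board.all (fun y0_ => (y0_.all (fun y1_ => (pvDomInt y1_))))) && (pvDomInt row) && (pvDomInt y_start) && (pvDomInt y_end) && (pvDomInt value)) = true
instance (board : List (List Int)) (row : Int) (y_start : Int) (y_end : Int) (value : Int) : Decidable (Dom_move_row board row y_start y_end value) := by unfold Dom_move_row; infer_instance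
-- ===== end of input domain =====

-- B replaces the direction-dependent carried-value swap loop by a branchless pop(y_start) + insert(y_end, value)
-- on the copied row: simpler (no direction case analysis). Return-value equivalence; neither program mutates its argument.

-- ===== PORT A =====
def move_row (board : List (List Int)) (row : Int) (y_start : Int) (y_end : Int) (value : Int) : List (List Int) :=
  let step : Int := if y_end > y_start then -1 else 1
  let index_start : Int := if y_end > y_start then y_start - 1 else y_start + 1
  ((PySem.List.pyRange y_end index_start step).foldl
    (fun (st : List (List Int) × Int) y =>
      let prev_val := PySem.List.pyGetD (PySem.List.pyGetD st.1 row []) y 0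
      (PySem.List.pySetD st.1 row (PySem.List.pySetD (PySem.List.pyGetD st.1 row []) y st.2), prev_val))
    (board, value)).1

-- ===== PORT B =====
def move_row_alt (board : List (List Int)) (row : Int) (y_start : Int) (y_end : Int) (value : Int) : List (List Int) :=
  match PySem.List.pyGet? board row with
  | none => board            -- board_copy[row] raises: outside Pre_
  | some shifted_row =>
    match PySem.List.pop? shifted_row y_start with
    | none => board          -- pop raises: outside Pre_
    | some pr => PySem.List.pySetD board row (PySem.List.insert pr.2 y_end value)

-- ===== PRECONDITION & SPEC =====
-- Pre_ excludes out-of-range indices (A raises IndexError there) and negative y_start/y_end, on which A's raw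
-- range bounds combined with Python's negative-index wraparound give accidental results (the loop can even wrap
-- mid-iteration, e.g. range(1, -3, -1)); a negative in-range row is allowed and matched.
def Pre_move_row (board : List (List Int)) (row : Int) (y_start : Int) (y_end : Int) (value : Int) : Prop :=
  PySem.Raise.InRange board.length row ∧
  0 ≤ y_start ∧ y_start < (PySem.List.pyGetD board row []).length ∧
  0 ≤ y_end ∧ y_end < (PySem.List.pyGetD board row []).length
instance (board : List (List Int)) (row : Int) (y_start : Int) (y_end : Int) (value : Int) : Decidable (Pre_move_row board row y_start y_end value) := by unfold Pre_move_row; infer_instance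

def pvWitness_move_row : List (List Int) × Int × Int × Int × Int := ([[1, 2, 3], [4, 5, 6]], 0, 2, 0, 7)

def Spec_move_row (board : List (List Int)) (row : Int) (y_start : Int) (y_end : Int) (value : Int) (out : List (List Int)) : Prop := out = move_row_alt board row y_start y_end value
instance (board : List (List Int)) (row : Int) (y_start : Int) (y_end : Int) (value : Int) (out : List (List Int)) : Decidable (Spec_move_row board row y_start y_end value out) := by unfold Spec_move_row; infer_instance

-- ===== CLAIM (what is proved, stated in full; the proofs are below) =====
def Claim_equal_move_row : Prop := ∀ (board : List (List Int)) (row : Int) (y_start : Int) (y_end : Int) (value : Int), Dom_move_row board row y_start y_end value → Pre_move_row board row y_start y_end value → Spec_move_row board row y_start y_end value (move_row board row y_start y_end value)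

-- ===== LEMMAS AND PROOFS =====

theorem pvIdx_resolve (n : Nat) (row : Int) (h : PySem.Raise.InRange n row) :
    ∃ i : Nat, i < n ∧ PySem.List.pyIdx? n row = some i := by
  obtain ⟨h1, h2⟩ := h
  by_cases hr : 0 ≤ row
  · exact ⟨row.toNat, by omega, by simp [PySem.List.pyIdx?, hr, h2]⟩
  · exact ⟨n - (-row).toNat, by omega, by simp [PySem.List.pyIdx?, hr, h1]⟩

theorem pvGet_of_idx {α : Type} (bc : List α) (row : Int) (i : Nat) (hi : i < bc.length)
    (hidx : PySem.List.pyIdx? bc.length row = some i) :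
    PySem.List.pyGet? bc row = some bc[i] := by
  simp [PySem.List.pyGet?, hidx, List.getElem?_eq_getElem hi]

theorem pvSet_of_idx {α : Type} (bc : List α) (row : Int) (i : Nat) (x : α)
    (hidx : PySem.List.pyIdx? bc.length row = some i) :
    PySem.List.pySetD bc row x = bc.set i x := by
  simp [PySem.List.pySetD, PySem.List.pySet?, hidx]

theorem pvB_row (l : List Int) (s e : Nat) (v : Int) (hs : s < l.length) (he : e < l.length) :
    PySem.List.insert (l.eraseIdx s) (e : Int) v
    = if s < e then l.take s ++ (l.drop (s + 1)).take (e - s) ++ v :: l.drop (e + 1)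
      else l.take e ++ v :: (l.drop e).take (s - e) ++ l.drop (s + 1) := by
  rw [List.eraseIdx_eq_take_drop_succ,
      PySem.List.insert_natCast _ e v (by simp [List.length_take, List.length_drop]; omega)]
  have hts : (l.take s).length = s := by simp only [List.length_take]; omega
  by_cases hse : s < e
  · rw [if_pos hse, List.take_append, List.drop_append, hts, List.take_take,
        List.drop_take, List.drop_drop]
    have h1 : min e s = s := by omega
    have h2 : s - e = 0 := by omega
    have h3 : s + 1 + (e - s) = e + 1 := by omega
    simp [h1, h2, h3]
  · rw [if_neg hse, List.take_append, List.drop_append, hts, List.take_take,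
        List.drop_take]
    have h1 : min e s = e := by omega
    have h2 : e - s = 0 := by omega
    simp [h1, h2]


def pvRowStep (st : List Int × Int) (y : Int) : List Int × Int :=
  (PySem.List.pySetD st.1 y st.2, PySem.List.pyGetD st.1 y 0)

theorem pvRowStep_natCast (l : List Int) (v : Int) (k : Nat) (hk : k < l.length) :
    pvRowStep (l, v) (k : Int) = (l.set k v, l[k]) := by
  simp [pvRowStep, List.getElem?_eq_getElem hk]

theorem pvLoop_down (d : Nat) : ∀ (s : Nat) (l : List Int) (v : Int), s + d < l.length →
    ((PySem.List.pyRange ((s + d : Nat) : Int) ((s : Int) - 1) (-1)).foldl pvRowStep (l, v)).1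
    = l.take s ++ (l.drop (s + 1)).take d ++ v :: l.drop (s + d + 1) := by
  induction d with
  | zero =>
    intro s l v h
    rw [PySem.List.pyRange_neg_one_cons (by push_cast; omega),
        show ((s + 0 : Nat) : Int) - 1 = (s : Int) - 1 by push_cast; ring,
        PySem.List.pyRange_neg_one_eq_nil le_rfl]
    simp only [List.foldl_cons, List.foldl_nil]
    rw [pvRowStep_natCast l v (s + 0) (by omega)]
    rw [List.set_eq_take_append_cons_drop, if_pos (by omega)]
    simp
  | succ d ih =>
    intro s l v h
    rw [PySem.List.pyRange_neg_one_cons (by push_cast; omega),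
        show ((s + (d+1) : Nat) : Int) - 1 = ((s + d : Nat) : Int) by push_cast; ring]
    simp only [List.foldl_cons]
    rw [pvRowStep_natCast l v (s + (d+1)) (by omega)]
    rw [ih s (l.set (s + (d+1)) v) (l[s + (d+1)]'(by omega)) (by simp only [List.length_set]; omega)]
    rw [List.take_set, List.set_eq_of_length_le (by simp only [List.length_take]; omega)]
    rw [List.drop_set, if_neg (by omega), List.take_set,
        List.set_eq_of_length_le (by simp only [List.length_take]; omega)]
    rw [List.drop_set, if_neg (by omega)]
    rw [show s + (d+1) - (s + d + 1) = 0 by omega]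
    rw [List.drop_eq_getElem_cons (by omega : s + d + 1 < l.length), List.set_cons_zero]
    rw [List.take_add_one]
    have hgd : (List.drop (s+1) l)[d]? = some (l[s + (d+1)]'(by omega)) := by
      rw [List.getElem?_eq_getElem (by simp; omega)]
      simp only [List.getElem_drop]
      exact congrArg some (by congr 1; omega)
    rw [hgd]
    simp [List.append_assoc]
    omega

theorem pvLoop_up (d : Nat) : ∀ (e : Nat) (l : List Int) (v : Int), e + d < l.length →
    ((PySem.List.pyRange (e : Int) ((e + d + 1 : Nat) : Int) 1).foldl pvRowStep (l, v)).1
    = l.take e ++ v :: (l.drop e).take d ++ l.drop (e + d + 1) := by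
  induction d with
  | zero =>
    intro e l v h
    rw [PySem.List.pyRange_one_cons (by push_cast; omega),
        PySem.List.pyRange_one_eq_nil (by push_cast; omega)]
    simp only [List.foldl_cons, List.foldl_nil]
    rw [pvRowStep_natCast l v e (by omega)]
    rw [List.set_eq_take_append_cons_drop, if_pos (by omega)]
    simp
  | succ d ih =>
    intro e l v h
    rw [PySem.List.pyRange_one_cons (by push_cast; omega),
        show ((e : Int)) + 1 = ((e + 1 : Nat) : Int) by push_cast; ring,
        show ((e + (d+1) + 1 : Nat) : Int) = (((e+1) + d + 1 : Nat) : Int) by push_cast; ring]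
    simp only [List.foldl_cons]
    rw [pvRowStep_natCast l v e (by omega)]
    rw [ih (e+1) (l.set e v) (l[e]'(by omega)) (by simp only [List.length_set]; omega)]
    rw [List.take_set, List.set_eq_take_append_cons_drop, if_pos (by simp only [List.length_take]; omega)]
    rw [List.take_take, List.drop_take, show e + 1 - (e + 1) = 0 by omega]
    rw [List.drop_set, if_pos (by omega), List.drop_set, if_pos (by omega)]
    rw [List.drop_eq_getElem_cons (by omega : e < l.length), List.take_succ_cons]
    simp [List.append_assoc]
    omega

-- factor A's board-level fold through the row it modifies
theorem pvFold_factor (row : Int) (i : Nat) (ys : List Int) :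
    ∀ (bc : List (List Int)) (v : Int) (hidx : PySem.List.pyIdx? bc.length row = some i) (hi : i < bc.length),
    ys.foldl
      (fun (st : List (List Int) × Int) y =>
        (PySem.List.pySetD st.1 row (PySem.List.pySetD (PySem.List.pyGetD st.1 row []) y st.2),
         PySem.List.pyGetD (PySem.List.pyGetD st.1 row []) y 0))
      (bc, v)
    = (bc.set i (ys.foldl pvRowStep (bc[i], v)).1, (ys.foldl pvRowStep (bc[i], v)).2) := by
  induction ys with
  | nil => intro bc v _ hi; simp [List.set_getElem_self]
  | cons y ys ih =>
    intro bc v hidx hi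
    have hget : PySem.List.pyGetD bc row [] = bc[i] := by
      simp [PySem.List.pyGetD, pvGet_of_idx bc row i hi hidx]
    simp only [List.foldl_cons, hget, pvSet_of_idx bc row i _ hidx]
    rw [ih (bc.set i (PySem.List.pySetD bc[i] y v)) (PySem.List.pyGetD bc[i] y 0)
          (by simpa using hidx) (by simpa using hi)]
    simp [pvRowStep, List.set_set]

-- ===== VERDICT (by name: the statement is the Claim_ definition above) =====
theorem move_row_spec : Claim_equal_move_row := by
  intro board row y_start y_end value hdom hpre
  obtain ⟨hrow, hys0, hysl, hye0, hyel⟩ := hpre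
  obtain ⟨i, hi, hidx⟩ := pvIdx_resolve board.length row hrow
  have hget : PySem.List.pyGet? board row = some (board[i]'hi) := pvGet_of_idx board row i hi hidx
  have hgetD : PySem.List.pyGetD board row [] = board[i]'hi := by simp [PySem.List.pyGetD, hget]
  rw [hgetD] at hysl hyel
  have hys : y_start = (y_start.toNat : Int) := by omega
  have hye : y_end = (y_end.toNat : Int) := by omega
  set s := y_start.toNat with hsdef
  set e := y_end.toNat with hedef
  have hsl : s < (board[i]'hi).length := by omega
  have hel : e < (board[i]'hi).length := by omega
  unfold Spec_move_row move_row_alt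
  rw [hget]
  simp only [hys, hye, PySem.List.pop?_natCast _ s hsl, pvSet_of_idx board row i _ hidx]
  rw [pvB_row _ s e value hsl hel]
  simp only [move_row]
  by_cases hse : s < e
  · rw [if_pos (show (s:Int) < (e:Int) from by exact_mod_cast hse),
        if_pos (show (s:Int) < (e:Int) from by exact_mod_cast hse)]
    rw [show (e:Int) = ((s + (e - s) : Nat) : Int) by push_cast; omega]
    rw [pvFold_factor row i _ board value hidx hi]
    rw [pvLoop_down (e - s) s (board[i]'hi) value (by omega)]
    rw [if_pos hse, show s + (e - s) + 1 = e + 1 by omega]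
  · rw [if_neg (show ¬ (s:Int) < (e:Int) from by omega),
        if_neg (show ¬ (s:Int) < (e:Int) from by omega)]
    rw [show (s:Int) + 1 = ((e + (s - e) + 1 : Nat) : Int) by push_cast; omega]
    rw [pvFold_factor row i _ board value hidx hi]
    rw [pvLoop_up (s - e) e (board[i]'hi) value (by omega)]
    rw [if_neg hse, show e + (s - e) + 1 = s + 1 by omega]
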